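-- pv_equiv track=rewrite | github.com/diana12131990/adventOfCode | 2025/Unfinished/Day12/day_12_1.py | generate_orientations
-- ===== SOURCE A (Python) =====
-- def normalize_shape(coords):
--     # Normalize a set of shape coordinates so that it's top-most and left-most
--     min_x = min(x for x,y in coords)
--     min_y = min(y for x,y in coords)
--     return frozenset({(x-min_x , y-min_y) for x,y in coords})
--
-- def rotate(coords):
--     max_x = max(x for x,y in coords)
--     return frozenset({(y,max_x-x) for x,y in coords})
--
-- def flip(coords):
--     max_y = max(y for x,y in coords)
--     return frozenset({(x,max_y-y) for x,y in coords})
--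
-- def generate_orientations(coords):
--     orientations = set()
--     current_orientation = coords
--
--     for _ in range(2): # original and flipped
--         for _ in range(4):
--             current_orientation = normalize_shape(current_orientation)
--             orientations.add(current_orientation)
--             current_orientation = rotate(current_orientation)
--         current_orientation = flip(coords)
--     return list(orientations)
-- ===== SOURCE B (Python) =====
-- def generate_orientations(coords):
--     # Direct enumeration of the 8 D4 symmetry maps (4 rotations x optional flip),
--     # each applied to the input in one pass and then normalized.
--     maps = [
--         lambda x, y: (x, y),
--         lambda x, y: (y, -x),
--         lambda x, y: (-x, -y),
--         lambda x, y: (-y, x),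
--         lambda x, y: (x, -y),
--         lambda x, y: (-y, -x),
--         lambda x, y: (-x, y),
--         lambda x, y: (y, x),
--     ]
--     orientations = set()
--     for m in maps:
--         cells = [m(x, y) for x, y in coords]
--         mx = min(x for x, y in cells)
--         my = min(y for x, y in cells)
--         orientations.add(frozenset((x - mx, y - my) for x, y in cells))
--     return list(orientations)
-- ===== Notes on version B (the rewrite author's own statement) =====
-- stated objective: simpler
-- what changed: B replaces A's iterated rotate/flip mutation of a running shape (with per-step max-based re-anchoring and re-normalization) by a direct enumeration of the 8 D4 symmetry coordinate maps, applying each to the input in a single pass and normalizing once.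
import Mathlib
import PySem

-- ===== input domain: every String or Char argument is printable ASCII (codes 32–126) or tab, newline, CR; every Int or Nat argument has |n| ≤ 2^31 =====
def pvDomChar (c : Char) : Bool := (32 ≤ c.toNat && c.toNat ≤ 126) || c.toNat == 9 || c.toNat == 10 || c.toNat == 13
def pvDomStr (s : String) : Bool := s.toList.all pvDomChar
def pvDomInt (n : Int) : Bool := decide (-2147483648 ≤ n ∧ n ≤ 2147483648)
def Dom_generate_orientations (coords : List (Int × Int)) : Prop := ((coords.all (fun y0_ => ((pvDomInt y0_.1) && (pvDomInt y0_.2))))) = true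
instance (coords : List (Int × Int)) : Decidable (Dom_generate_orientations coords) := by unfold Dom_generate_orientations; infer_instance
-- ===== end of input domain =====

-- B enumerates the 8 D4 coordinate maps directly (one pass + normalize per orientation) instead of
-- A's iterated rotate/flip mutation of a running shape; objective: simpler decomposition, same cost.
-- Both Pythons return list(set); the set's iteration order is ported as insertion order.

-- ===== PORT A =====
-- Python set.add on frozensets: membership test is set equality (shared by both ports,
-- as both Pythons accumulate frozensets in a Python set).
def fsetAdd (s : List (List (Int × Int))) (x : List (Int × Int)) : List (List (Int × Int)) :=
  if s.any (fun y => PySem.Set.equal y x) then s else s ++ [x]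

def normalize_shape (coords : List (Int × Int)) : List (Int × Int) :=
  match PySem.List.min? (coords.map (fun p => p.1)) (fun v => v),
        PySem.List.min? (coords.map (fun p => p.2)) (fun v => v) with
  | some min_x, some min_y =>
      PySem.Set.ofList (coords.map (fun p => (p.1 - min_x, p.2 - min_y)))
  | _, _ => []   -- Python raises ValueError (min of empty); excluded by Pre_

def rotate (coords : List (Int × Int)) : List (Int × Int) :=
  match PySem.List.max? (coords.map (fun p => p.1)) (fun v => v) with
  | some max_x => PySem.Set.ofList (coords.map (fun p => (p.2, max_x - p.1)))
  | none => []   -- unreachable under Pre_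

def flipShape (coords : List (Int × Int)) : List (Int × Int) :=
  match PySem.List.max? (coords.map (fun p => p.2)) (fun v => v) with
  | some max_y => PySem.Set.ofList (coords.map (fun p => (p.1, max_y - p.2)))
  | none => []   -- unreachable under Pre_

def generate_orientations (coords : List (Int × Int)) : List (List (Int × Int)) :=
  (((PySem.List.pyRange 0 2 1).foldl
    (fun (st : List (List (Int × Int)) × List (Int × Int)) _ =>
      let st4 := (PySem.List.pyRange 0 4 1).foldl
        (fun (st : List (List (Int × Int)) × List (Int × Int)) _ =>
          let cur := normalize_shape st.2
          let ors := fsetAdd st.1 cur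
          (ors, rotate cur)) st
      (st4.1, flipShape coords))
    ([], coords))).1

-- ===== PORT B =====
-- normalized image of coords under one coordinate map m (Source B's loop body before the add)
def canon (coords : List (Int × Int)) (m : (Int × Int) → (Int × Int)) : List (Int × Int) :=
  match PySem.List.min? ((coords.map m).map (fun p => p.1)) (fun v => v),
        PySem.List.min? ((coords.map m).map (fun p => p.2)) (fun v => v) with
  | some mx, some my => PySem.Set.ofList ((coords.map m).map (fun p => (p.1 - mx, p.2 - my)))
  | _, _ => []   -- Python raises ValueError (min of empty); excluded by Pre_

def generate_orientations_alt (coords : List (Int × Int)) : List (List (Int × Int)) :=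
  ([fun p => (p.1, p.2), fun p => (p.2, -p.1), fun p => (-p.1, -p.2), fun p => (-p.2, p.1),
    fun p => (p.1, -p.2), fun p => (-p.2, -p.1), fun p => (-p.1, p.2), fun p => (p.2, p.1)]
    : List ((Int × Int) → (Int × Int))).foldl
    (fun ors m => fsetAdd ors (canon coords m)) []

-- ===== PRECONDITION & SPEC =====
-- Pre_ excludes only the empty list, on which both Pythons raise ValueError (min of empty sequence).
def Pre_generate_orientations (coords : List (Int × Int)) : Prop := coords ≠ []
instance (coords : List (Int × Int)) : Decidable (Pre_generate_orientations coords) := by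
  unfold Pre_generate_orientations; infer_instance

def pvWitness_generate_orientations : (List (Int × Int)) := [(0, 0), (0, 1)]

def Spec_generate_orientations (coords : List (Int × Int)) (out : List (List (Int × Int))) : Prop := out = generate_orientations_alt coords
instance (coords : List (Int × Int)) (out : List (List (Int × Int))) : Decidable (Spec_generate_orientations coords out) := by unfold Spec_generate_orientations; infer_instance

-- ===== CLAIM (what is proved, stated in full; the proofs are below) =====
def Claim_equal_generate_orientations : Prop := ∀ (coords : List (Int × Int)), Dom_generate_orientations coords → Pre_generate_orientations coords → Spec_generate_orientations coords (generate_orientations coords)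

-- ===== LEMMAS AND PROOFS =====

-- dedup (Set.ofList) commutes with an injective map
theorem ofList_map_comm {α β : Type} [BEq α] [LawfulBEq α] [BEq β] [LawfulBEq β] (f : α → β)
    (hf : Function.Injective f) (l : List α) :
    PySem.Set.ofList (l.map f) = (PySem.Set.ofList l).map f := by
  induction l with
  | nil => rfl
  | cons x xs ih =>
      rw [List.map_cons, PySem.Set.ofList_cons, PySem.Set.ofList_cons, List.map_cons, ih]
      congr 1
      show List.filter _ (List.map f _) = List.map f (List.filter _ _)
      rw [List.filter_map]
      apply congrArg
      apply List.filter_congr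
      intro a _
      simp [Function.comp, hf.eq_iff]

-- collapse: ofList (map f (ofList l)) = ofList (map f l) for injective f
theorem ofList_map_ofList {α β : Type} [BEq α] [LawfulBEq α] [BEq β] [LawfulBEq β] (f : α → β)
    (hf : Function.Injective f) (l : List α) :
    PySem.Set.ofList ((PySem.Set.ofList l).map f) = PySem.Set.ofList (l.map f) := by
  rw [ofList_map_comm f hf, PySem.Set.ofList_ofList, ← ofList_map_comm f hf]

-- min?/max? with identity key are determined by membership and extremality
theorem min?_eq_of (l : List Int) (v : Int) (hv : v ∈ l) (hmin : ∀ y ∈ l, v ≤ y) :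
    PySem.List.min? l (fun x => x) = some v := by
  cases h : PySem.List.min? l (fun x => x) with
  | none => rw [PySem.List.min?_eq_none_iff] at h; subst h; cases hv
  | some m =>
      have hm := PySem.List.min?_mem h
      have h1 : m ≤ v := PySem.List.min?_isMin h v hv
      exact congrArg some (le_antisymm h1 (hmin m hm))

theorem max?_eq_of (l : List Int) (v : Int) (hv : v ∈ l) (hmax : ∀ y ∈ l, y ≤ v) :
    PySem.List.max? l (fun x => x) = some v := by
  cases h : PySem.List.max? l (fun x => x) with
  | none => rw [PySem.List.max?_eq_none_iff] at h; subst h; cases hv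
  | some m =>
      have hm := PySem.List.max?_mem h
      have h1 : v ≤ m := PySem.List.max?_isMax h v hv
      exact congrArg some (le_antisymm (hmax m hm) h1)

theorem min?_some (l : List Int) (h : l ≠ []) :
    ∃ v, PySem.List.min? l (fun x => x) = some v := by
  cases h' : PySem.List.min? l (fun x => x) with
  | none => exact absurd ((PySem.List.min?_eq_none_iff l _).1 h') h
  | some v => exact ⟨v, rfl⟩

theorem max?_some (l : List Int) (h : l ≠ []) :
    ∃ v, PySem.List.max? l (fun x => x) = some v := by
  cases h' : PySem.List.max? l (fun x => x) with
  | none => exact absurd ((PySem.List.max?_eq_none_iff l _).1 h') h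
  | some v => exact ⟨v, rfl⟩

theorem subpair_inj (a b : Int) : Function.Injective (fun p : Int × Int => (p.1 - a, p.2 - b)) := by
  intro p q h
  simp only [Prod.ext_iff] at h ⊢
  omega

-- normalizing the dedup of an affine image of coords equals canon of its linear part
theorem norm_ofList_map (c : List (Int × Int)) (g lin : (Int × Int) → (Int × Int)) (k : Int × Int)
    (hg : ∀ p, g p = ((lin p).1 + k.1, (lin p).2 + k.2))
    (mx my : Int)
    (hmx : PySem.List.min? ((c.map lin).map (fun p => p.1)) (fun v => v) = some mx)
    (hmy : PySem.List.min? ((c.map lin).map (fun p => p.2)) (fun v => v) = some my) :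
    normalize_shape (PySem.Set.ofList (c.map g)) = canon c lin := by
  have hmem := PySem.List.min?_mem hmx
  have hmem2 := PySem.List.min?_mem hmy
  have hmx' : PySem.List.min? ((PySem.Set.ofList (c.map g)).map (fun p => p.1)) (fun v => v)
      = some (mx + k.1) := by
    apply min?_eq_of
    · simp only [List.mem_map, PySem.Set.mem_ofList] at hmem ⊢
      obtain ⟨p, hp, hpe⟩ := hmem
      obtain ⟨q, hq, hqe⟩ := hp
      exact ⟨g q, ⟨q, hq, rfl⟩, by rw [hg q, hqe, hpe]⟩
    · intro y hy
      simp only [List.mem_map, PySem.Set.mem_ofList] at hy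
      obtain ⟨p, ⟨q, hq, rfl⟩, rfl⟩ := hy
      have : mx ≤ (lin q).1 := PySem.List.min?_isMin hmx _
        (List.mem_map.2 ⟨lin q, List.mem_map.2 ⟨q, hq, rfl⟩, rfl⟩)
      rw [hg q]; dsimp; omega
  have hmy' : PySem.List.min? ((PySem.Set.ofList (c.map g)).map (fun p => p.2)) (fun v => v)
      = some (my + k.2) := by
    apply min?_eq_of
    · simp only [List.mem_map, PySem.Set.mem_ofList] at hmem2 ⊢
      obtain ⟨p, hp, hpe⟩ := hmem2
      obtain ⟨q, hq, hqe⟩ := hp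
      exact ⟨g q, ⟨q, hq, rfl⟩, by rw [hg q, hqe, hpe]⟩
    · intro y hy
      simp only [List.mem_map, PySem.Set.mem_ofList] at hy
      obtain ⟨p, ⟨q, hq, rfl⟩, rfl⟩ := hy
      have : my ≤ (lin q).2 := PySem.List.min?_isMin hmy _
        (List.mem_map.2 ⟨lin q, List.mem_map.2 ⟨q, hq, rfl⟩, rfl⟩)
      rw [hg q]; dsimp; omega
  unfold normalize_shape canon
  rw [hmx', hmy', hmx, hmy]
  dsimp only
  rw [ofList_map_ofList _ (subpair_inj (mx + k.1) (my + k.2))]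
  rw [List.map_map, List.map_map]
  apply congrArg
  apply List.map_congr_left
  intro p _
  rw [Function.comp_apply, Function.comp_apply, hg p]
  simp only [Prod.mk.injEq]
  omega

theorem canon_id (c : List (Int × Int)) :
    canon c (fun p => (p.1, p.2)) = normalize_shape c := by
  unfold canon normalize_shape
  rw [show List.map (fun p : Int × Int => (p.1, p.2)) c = c by simp]

theorem norm_flip (c : List (Int × Int)) (hc : c ≠ []) :
    normalize_shape (flipShape c) = canon c (fun p => (p.1, -p.2)) := by
  have hne : c.map (fun p : Int × Int => (p.1, -p.2)) ≠ [] := by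
    simpa using hc
  obtain ⟨My, hMy⟩ := max?_some (c.map (fun p => p.2)) (by simpa using hc)
  obtain ⟨mx, hmx⟩ := min?_some ((c.map (fun p : Int × Int => (p.1, -p.2))).map (fun p => p.1))
    (by simpa using hc)
  obtain ⟨my, hmy⟩ := min?_some ((c.map (fun p : Int × Int => (p.1, -p.2))).map (fun p => p.2))
    (by simpa using hc)
  unfold flipShape
  rw [hMy]
  dsimp only
  exact norm_ofList_map c _ _ (0, My) (fun p => by simp only [Prod.mk.injEq]; omega) mx my hmx hmy

theorem norm_rot_canon (c : List (Int × Int)) (hc : c ≠ []) (m : (Int × Int) → (Int × Int)) :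
    normalize_shape (rotate (canon c m)) = canon c (fun p => ((m p).2, -(m p).1)) := by
  obtain ⟨mx, hmx⟩ := min?_some ((c.map m).map (fun p => p.1)) (by simpa using hc)
  obtain ⟨my, hmy⟩ := min?_some ((c.map m).map (fun p => p.2)) (by simpa using hc)
  obtain ⟨Mx, hMx⟩ := max?_some ((c.map m).map (fun p => p.1)) (by simpa using hc)
  have hA : canon c m
      = PySem.Set.ofList ((c.map m).map (fun p => (p.1 - mx, p.2 - my))) := by
    unfold canon; rw [hmx, hmy]
  rw [hA]
  have hM' : PySem.List.max?
      ((PySem.Set.ofList ((c.map m).map (fun p => (p.1 - mx, p.2 - my)))).map (fun p => p.1))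
      (fun v => v) = some (Mx - mx) := by
    apply max?_eq_of
    · obtain ⟨q, hq, hq1⟩ := List.mem_map.1 (PySem.List.max?_mem hMx)
      refine List.mem_map.2 ⟨(q.1 - mx, q.2 - my),
        (PySem.Set.mem_ofList _ _).2 (List.mem_map.2 ⟨q, hq, rfl⟩), ?_⟩
      dsimp; omega
    · intro y hy
      obtain ⟨p, hp, rfl⟩ := List.mem_map.1 hy
      obtain ⟨q, hq, rfl⟩ := List.mem_map.1 ((PySem.Set.mem_ofList _ _).1 hp)
      have : q.1 ≤ Mx := PySem.List.max?_isMax hMx _ (List.mem_map.2 ⟨q, hq, rfl⟩)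
      dsimp; omega
  unfold rotate
  rw [hM']
  dsimp only
  rw [ofList_map_ofList _ (by intro p q h; simp only [Prod.ext_iff] at h ⊢; omega :
    Function.Injective (fun p : Int × Int => (p.2, Mx - mx - p.1)))]
  rw [List.map_map, List.map_map]
  obtain ⟨nx, hnx⟩ := min?_some
    ((c.map (fun p => ((m p).2, -(m p).1))).map (fun p => p.1)) (by simpa using hc)
  obtain ⟨ny, hny⟩ := min?_some
    ((c.map (fun p => ((m p).2, -(m p).1))).map (fun p => p.2)) (by simpa using hc)
  exact norm_ofList_map c _ _ (-my, Mx)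
    (fun p => by simp only [Function.comp_apply, Prod.mk.injEq]; omega) nx ny hnx hny

-- ===== VERDICT (by name: the statement is the Claim_ definition above) =====
theorem generate_orientations_spec : Claim_equal_generate_orientations := by
  intro coords _ hpre
  unfold Spec_generate_orientations generate_orientations generate_orientations_alt
  have h2 : PySem.List.pyRange 0 2 1 = [0, 1] := by decide
  have h4 : PySem.List.pyRange 0 4 1 = [0, 1, 2, 3] := by decide
  simp only [h2, h4, List.foldl]
  rw [show normalize_shape coords = canon coords (fun p => (p.1, p.2)) from
    (canon_id coords).symm]
  simp only [norm_rot_canon coords hpre, norm_flip coords hpre, neg_neg]
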